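-- pv_equiv track=rewrite | github.com/alan-turing-institute/advent-of-code-2022 | day-23/python_iain-s/day23.py | double_grove
-- ===== SOURCE A (Python) =====
-- from typing import List
--
-- def double_grove(grove: List[List[str]]):
--     half_y = len(grove) // 2
--     if half_y * 2 < len(grove):
--         half_y += 1
--     # new_y = len(grove) * 2
--     new_y = half_y * 2 + len(grove)
--     # y_offset = len(grove) // 2
--     y_offset = half_y
--     # if new_y % 2 == 1:
--     #     new_y += 1
--     #     y_offset += 1
--
--     half_x = len(grove[0]) // 2
--     if half_x * 2 < len(grove[0]):
--         half_x += 1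
--     new_x = half_x * 2 + len(grove[0])
--     x_offset = half_x
--
--     new_grove = [["." for __ in range(new_x)] for _ in range(new_y)]
--     for y in range(len(grove)):
--         for x in range(len(grove[0])):
--             if grove[y][x] == "#":
--                 new_grove[y + y_offset][x + x_offset] = "#"
--
--     return new_grove
-- ===== SOURCE B (Python) =====
-- def double_grove(grove):
--     h, w = len(grove), len(grove[0])
--     occupied = {(y, x) for y in range(h) for x in range(w) if grove[y][x] == "#"}
--     y_offset, x_offset = (h + 1) // 2, (w + 1) // 2
--     return [["#" if (Y - y_offset, X - x_offset) in occupied else "."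
--              for X in range(w + 2 * x_offset)]
--             for Y in range(h + 2 * y_offset)]
-- ===== Notes on version B (the rewrite author's own statement) =====
-- stated objective: alternative
-- what changed: Replaces A's allocate-a-blank-grid-then-scatter-by-index with a sparse two-stage gather: first collect the set of occupied (y,x) coordinates, then generate the doubled grid cell by cell, each destination cell looking up its inverse-translated coordinate in that set.
import Mathlib
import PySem

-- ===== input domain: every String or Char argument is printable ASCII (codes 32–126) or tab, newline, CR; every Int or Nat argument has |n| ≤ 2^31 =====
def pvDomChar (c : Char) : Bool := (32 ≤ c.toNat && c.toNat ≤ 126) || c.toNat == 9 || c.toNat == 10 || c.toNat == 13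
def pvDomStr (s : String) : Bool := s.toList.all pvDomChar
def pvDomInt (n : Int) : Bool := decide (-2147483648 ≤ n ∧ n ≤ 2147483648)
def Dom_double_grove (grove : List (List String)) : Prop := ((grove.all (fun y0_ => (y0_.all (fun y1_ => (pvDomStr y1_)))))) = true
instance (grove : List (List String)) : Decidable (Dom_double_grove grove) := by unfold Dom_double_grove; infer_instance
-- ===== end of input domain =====

-- B replaces A's allocate-a-blank-grid-then-scatter-by-index strategy with a sparse
-- two-stage gather: collect the set of occupied (y,x) coordinates, then generate the
-- doubled grid cell by cell, each destination looking up its inverse-translated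
-- coordinate in that set; objective: alternative algorithm, same cost.

-- ===== PORT A =====
-- literal transliteration of A: half computations, blank new_y×new_x grid,
-- then a double loop scattering "#" cells by index (List.set = in-place assignment).
def double_grove (grove : List (List String)) : List (List String) :=
  let hy0 := grove.length / 2
  let half_y := if hy0 * 2 < grove.length then hy0 + 1 else hy0
  let new_y := half_y * 2 + grove.length
  let y_offset := half_y
  let row0 := grove.getD 0 []            -- grove[0]; Python raises on empty grove (excluded by Pre_)
  let hx0 := row0.length / 2
  let half_x := if hx0 * 2 < row0.length then hx0 + 1 else hx0
  let new_x := half_x * 2 + row0.length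
  let x_offset := half_x
  let init := (List.range new_y).map (fun _ => (List.range new_x).map (fun _ => "."))
  (List.range grove.length).foldl (fun ng y =>
    (List.range row0.length).foldl (fun ng x =>
      if (grove.getD y []).getD x "" = "#" then
        ng.set (y + y_offset) ((ng.getD (y + y_offset) []).set (x + x_offset) "#")
      else ng) ng) init

-- ===== PORT B =====
-- transliteration of Source B: the set comprehension of occupied coordinates (PySem.Set
-- built with ofList over the generated pairs), then the nested list comprehension
-- over destination coordinates with a membership test on the inverse translation.
def double_grove_alt (grove : List (List String)) : List (List String) :=
  let h := grove.length
  let w := (grove.getD 0 []).length      -- len(grove[0]); Python raises on empty grove (excluded by Pre_)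
  let occupied : PySem.Set (Int × Int) :=
    PySem.Set.ofList ((List.range h).flatMap (fun y =>
      (List.range w).filterMap (fun x =>
        if (grove.getD y []).getD x "" = "#" then some ((y : Int), (x : Int)) else none)))
  let y_offset := (h + 1) / 2
  let x_offset := (w + 1) / 2
  (List.range (h + 2 * y_offset)).map (fun (Y : ℕ) =>
    (List.range (w + 2 * x_offset)).map (fun (X : ℕ) =>
      if PySem.Set.contains occupied ((Y : Int) - y_offset, (X : Int) - x_offset) then "#" else "."))

-- ===== PRECONDITION & SPEC =====
-- Pre_ excludes exactly the inputs where Python A raises IndexError: the empty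
-- grove (grove[0]) and grids whose first row is longer than some later row
-- (grove[y][x] for x < len(grove[0])).  B raises there too.
def Pre_double_grove (grove : List (List String)) : Prop :=
  grove ≠ [] ∧ ∀ row ∈ grove, (grove.getD 0 []).length ≤ row.length
instance (grove : List (List String)) : Decidable (Pre_double_grove grove) := by
  unfold Pre_double_grove; infer_instance
def pvWitness_double_grove : List (List String) := [["#", "."], [".", "#"]]

def Spec_double_grove (grove : List (List String)) (out : List (List String)) : Prop := out = double_grove_alt grove
instance (grove : List (List String)) (out : List (List String)) : Decidable (Spec_double_grove grove out) := by unfold Spec_double_grove; infer_instance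

-- ===== CLAIM (what is proved, stated in full; the proofs are below) =====
def Claim_equal_double_grove : Prop := ∀ (grove : List (List String)), Dom_double_grove grove → Pre_double_grove grove → Spec_double_grove grove (double_grove grove)

-- ===== LEMMAS AND PROOFS =====

-- the common intermediate form both ports are proved equal to:
-- y_offset blank rows, the translated rows, y_offset blank rows
def pvBlank (w xo : ℕ) : List String :=
  List.replicate xo "." ++ List.replicate w "." ++ List.replicate xo "."

def pvRowB (row : List String) (w xo : ℕ) : List String :=
  List.replicate xo "." ++
    (List.range w).map (fun x => if row.getD x "" = "#" then "#" else ".") ++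
    List.replicate xo "."

def pvPadded (grove : List (List String)) : List (List String) :=
  let w := (grove.getD 0 []).length
  let yo := (grove.length + 1) / 2
  let xo := (w + 1) / 2
  List.replicate yo (pvBlank w xo) ++ grove.map (fun row => pvRowB row w xo) ++
    List.replicate yo (pvBlank w xo)

-- ceil(n/2) written A's way equals (n+1)/2
theorem pv_half_eq (n : ℕ) : (if n / 2 * 2 < n then n / 2 + 1 else n / 2) = (n + 1) / 2 := by
  split_ifs <;> omega

-- setting at the length of the left part of an append replaces the middle element
theorem pv_set_append_mid {α : Type} (l1 : List α) (a : α) (t : List α) (v : α) :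
    (l1 ++ a :: t).set l1.length v = l1 ++ v :: t := by
  induction l1 with
  | nil => rfl
  | cons b l ih => simp [ih]

theorem pv_getD_append_mid {α : Type} (l1 : List α) (a : α) (t : List α) (d : α) :
    (l1 ++ a :: t).getD l1.length d = a := by
  induction l1 with
  | nil => rfl
  | cons b l ih => simp only [List.length_cons, List.cons_append, List.getD_cons_succ]; exact ih

-- a fold whose every step edits row k of the outer list equals one edit of row k
theorem pv_lift_row (row : List String) (xo k : ℕ) :
    ∀ (l : List ℕ) (ng : List (List String)),
    l.foldl (fun ng x =>
        if row.getD x "" = "#" then ng.set k ((ng.getD k []).set (x + xo) "#") else ng) ng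
      = ng.set k (l.foldl (fun r x =>
          if row.getD x "" = "#" then r.set (x + xo) "#" else r) (ng.getD k [])) := by
  intro l
  induction l with
  | nil =>
    intro ng
    by_cases hk : k < ng.length
    · simp only [List.foldl_nil]
      rw [List.getD_eq_getElem?_getD, List.getElem?_eq_getElem hk, Option.getD_some,
        List.set_getElem_self hk]
    · simp only [List.foldl_nil]
      rw [List.set_eq_of_length_le (by omega)]
  | cons x l ih =>
    intro ng
    rw [List.foldl_cons, List.foldl_cons]
    by_cases hc : row.getD x "" = "#"
    · rw [if_pos hc, if_pos hc, ih]
      by_cases hk : k < ng.length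
      · have hget : ((ng.set k ((ng.getD k []).set (x + xo) "#")).getD k [])
            = (ng.getD k []).set (x + xo) "#" := by
          rw [List.getD_eq_getElem?_getD, List.getElem?_set_self hk, Option.getD_some]
        rw [hget, List.set_set]
      · have hs : ∀ v : List String, ng.set k v = ng := fun v =>
          List.set_eq_of_length_le (by omega)
        rw [hs, hs, hs]
    · rw [if_neg hc, if_neg hc, ih]

-- the inner loop on a blank row produces the rebuilt row
theorem pv_row_fold (row : List String) (xo : ℕ) :
    ∀ (w : ℕ) (tail : List String),
    (List.range w).foldl (fun r x =>
        if row.getD x "" = "#" then r.set (x + xo) "#" else r)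
      (List.replicate xo "." ++ List.replicate w "." ++ tail)
      = List.replicate xo "." ++
          (List.range w).map (fun x => if row.getD x "" = "#" then "#" else ".") ++ tail := by
  intro w
  induction w with
  | zero => intro tail; simp
  | succ w ih =>
    intro tail
    have h0 : List.replicate (w + 1) ("." : String) ++ tail
        = List.replicate w "." ++ ("." :: tail) := by
      rw [List.replicate_succ', List.append_assoc]; rfl
    have hrep : List.replicate xo "." ++ List.replicate (w + 1) "." ++ tail
        = List.replicate xo "." ++ List.replicate w "." ++ ("." :: tail) := by
      rw [List.append_assoc, h0, ← List.append_assoc]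
    have hlen : (List.replicate xo "." ++
        (List.range w).map (fun x => if row.getD x "" = "#" then "#" else ".")).length
        = w + xo := by
      simp [Nat.add_comm]
    rw [List.range_succ, List.foldl_append, hrep, ih ("." :: tail),
      List.foldl_cons, List.foldl_nil]
    by_cases hc : row.getD w "" = "#"
    · rw [if_pos hc, ← hlen, pv_set_append_mid]
      rw [List.getD_eq_getElem?_getD] at hc
      simp [hc, List.append_assoc]
    · rw [if_neg hc]
      rw [List.getD_eq_getElem?_getD] at hc
      simp [hc, List.append_assoc]

-- outer-loop invariant: after n rows, the grid is top padding ++ rebuilt rows ++ blanks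
theorem pv_outer (grove : List (List String)) (xo yo : ℕ) (w : ℕ) :
    ∀ n, n ≤ grove.length →
    (List.range n).foldl (fun ng y =>
        (List.range w).foldl (fun ng x =>
          if (grove.getD y []).getD x "" = "#" then
            ng.set (y + yo) ((ng.getD (y + yo) []).set (x + xo) "#")
          else ng) ng)
      (List.replicate (yo + grove.length + yo)
        (List.replicate xo "." ++ List.replicate w "." ++ List.replicate xo "."))
      = List.replicate yo (List.replicate xo "." ++ List.replicate w "." ++ List.replicate xo ".")
        ++ (grove.take n).map (fun row =>
              List.replicate xo "." ++
                (List.range w).map (fun x => if row.getD x "" = "#" then "#" else ".") ++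
                List.replicate xo ".")
        ++ List.replicate (grove.length - n + yo)
            (List.replicate xo "." ++ List.replicate w "." ++ List.replicate xo ".") := by
  intro n
  induction n with
  | zero =>
    intro _
    rw [List.range_zero, List.foldl_nil, List.take_zero, List.map_nil, List.append_nil,
      show yo + grove.length + yo = yo + (grove.length - 0 + yo) from by omega,
      List.replicate_add]
  | succ n ih =>
    intro hn
    have hlt : n < grove.length := by omega
    rw [List.range_succ, List.foldl_append, ih (by omega), List.foldl_cons, List.foldl_nil,
      pv_lift_row (grove.getD n []) xo (n + yo)]
    have hlen : (List.replicate yo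
          (List.replicate xo "." ++ List.replicate w "." ++ List.replicate xo ".")
        ++ (grove.take n).map (fun row =>
              List.replicate xo "." ++
                (List.range w).map (fun x => if row.getD x "" = "#" then "#" else ".") ++
                List.replicate xo ".")).length = n + yo := by
      simp [Nat.min_eq_left (by omega : n ≤ grove.length), Nat.add_comm]
    have hsplit : List.replicate (grove.length - n + yo)
          (List.replicate xo "." ++ List.replicate w "." ++ List.replicate xo ".")
        = (List.replicate xo "." ++ List.replicate w "." ++ List.replicate xo ".")
          :: List.replicate (grove.length - (n + 1) + yo)
            (List.replicate xo "." ++ List.replicate w "." ++ List.replicate xo ".") := by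
      rw [show grove.length - n + yo = (grove.length - (n + 1) + yo) + 1 from by omega,
        List.replicate_succ]
    have htake : grove.take (n + 1) = grove.take n ++ [grove.getD n []] := by
      rw [List.take_add_one, List.getElem?_eq_getElem hlt, List.getD_eq_getElem _ _ hlt]
      rfl
    rw [hsplit, ← hlen, pv_getD_append_mid, pv_row_fold, pv_set_append_mid, htake]
    simp [List.append_assoc]

-- A equals the padded form
theorem pv_A_eq_padded (grove : List (List String)) : double_grove grove = pvPadded grove := by
  simp only [double_grove, pvPadded, pvBlank, pvRowB, pv_half_eq]
  have hinit : (List.range ((grove.length + 1) / 2 * 2 + grove.length)).map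
      (fun _ => (List.range (((grove.getD 0 []).length + 1) / 2 * 2 + (grove.getD 0 []).length)).map
        (fun _ => ("." : String)))
      = List.replicate ((grove.length + 1) / 2 + grove.length + (grove.length + 1) / 2)
          (List.replicate (((grove.getD 0 []).length + 1) / 2) "." ++
            List.replicate (grove.getD 0 []).length "." ++
            List.replicate (((grove.getD 0 []).length + 1) / 2) ".") := by
    rw [List.map_const', List.map_const', List.length_range, List.length_range,
      show ((grove.getD 0 []).length + 1) / 2 * 2 + (grove.getD 0 []).length
          = (((grove.getD 0 []).length + 1) / 2 + (grove.getD 0 []).length)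
            + ((grove.getD 0 []).length + 1) / 2 from by omega,
      show (grove.length + 1) / 2 * 2 + grove.length
          = (grove.length + 1) / 2 + grove.length + (grove.length + 1) / 2 from by omega]
    congr 1
    rw [List.replicate_add, List.replicate_add]
  rw [hinit, pv_outer grove (((grove.getD 0 []).length + 1) / 2) ((grove.length + 1) / 2)
      (grove.getD 0 []).length grove.length le_rfl, List.take_length,
    Nat.sub_self, Nat.zero_add]

-- membership in B's occupied set, characterised
theorem pv_mem_occ (grove : List (List String)) (h w : ℕ) (p : Int × Int) :
    (p ∈ PySem.Set.ofList ((List.range h).flatMap (fun y =>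
        (List.range w).filterMap (fun x =>
          if (grove.getD y []).getD x "" = "#" then some ((y : Int), (x : Int)) else none))))
    ↔ ∃ y < h, ∃ x < w, p = ((y : Int), (x : Int)) ∧ (grove.getD y []).getD x "" = "#" := by
  rw [PySem.Set.mem_ofList]
  simp only [List.mem_flatMap, List.mem_filterMap, List.mem_range,
    Option.ite_none_right_eq_some, Option.some.injEq]
  constructor
  · rintro ⟨y, hy, x, hx, hc, rfl⟩; exact ⟨y, hy, x, hx, rfl, hc⟩
  · rintro ⟨y, hy, x, hx, rfl, hc⟩; exact ⟨y, hy, x, hx, hc, rfl⟩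

-- pvBlank is a row of dots
theorem pv_blank_eq (w xo : ℕ) : pvBlank w xo = List.replicate (xo + (w + xo)) "." := by
  rw [pvBlank, List.append_assoc, ← List.replicate_add, ← List.replicate_add]

-- B equals the padded form
theorem pv_B_eq_padded (grove : List (List String)) :
    double_grove_alt grove = pvPadded grove := by
  simp only [double_grove_alt, pvPadded]
  set h := grove.length with hh
  set w := (grove.getD 0 []).length with hw
  set yo := (h + 1) / 2 with hyo
  set xo := (w + 1) / 2 with hxo
  apply List.ext_getElem
  · simp [pvBlank, pvRowB]; omega
  intro Y hY1 hY2
  rw [List.getElem_map, List.getElem_range]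
  have hYlt : Y < h + 2 * yo := by simpa using hY1
  have hcell : ∀ X : ℕ,
      (PySem.Set.contains (PySem.Set.ofList ((List.range h).flatMap (fun y =>
        (List.range w).filterMap (fun x =>
          if (grove.getD y []).getD x "" = "#" then some ((y : Int), (x : Int)) else none))))
        ((Y : Int) - (yo : Int), (X : Int) - (xo : Int)) = true)
      ↔ (yo ≤ Y ∧ Y < yo + h ∧ xo ≤ X ∧ X < xo + w ∧
          (grove.getD (Y - yo) []).getD (X - xo) "" = "#") := by
    intro X
    rw [PySem.Set.contains_iff, pv_mem_occ]
    constructor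
    · rintro ⟨y, hy, x, hx, hp, hc⟩
      have h1 : (Y : Int) - yo = y := by
        have := congrArg Prod.fst hp; simpa using this
      have h2 : (X : Int) - xo = x := by
        have := congrArg Prod.snd hp; simpa using this
      have hYy : Y = y + yo := by omega
      have hXx : X = x + xo := by omega
      refine ⟨by omega, by omega, by omega, by omega, ?_⟩
      rw [show Y - yo = y from by omega, show X - xo = x from by omega]; exact hc
    · rintro ⟨h1, h2, h3, h4, hc⟩
      refine ⟨Y - yo, by omega, X - xo, by omega, ?_, hc⟩
      simp only [Prod.mk.injEq]
      constructor <;> [omega; omega]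
  by_cases hmid : yo ≤ Y ∧ Y < yo + h
  · -- middle band: row Y - yo of grove
    obtain ⟨hm1, hm2⟩ := hmid
    have hr : Y - yo < h := by omega
    have hYget : (List.replicate yo (pvBlank w xo) ++ grove.map (fun row => pvRowB row w xo) ++
        List.replicate yo (pvBlank w xo))[Y]'hY2 = pvRowB (grove[Y - yo]'hr) w xo := by
      rw [List.getElem_append_left (by simp; omega),
        List.getElem_append_right (by simp; omega), List.getElem_map]
      simp
    rw [hYget]
    apply List.ext_getElem
    · simp [pvRowB]; omega
    intro X hX1 hX2
    rw [List.getElem_map, List.getElem_range]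
    have hXlt : X < w + 2 * xo := by simpa using hX1
    have hgetDrow : grove.getD (Y - yo) [] = grove[Y - yo]'hr := List.getD_eq_getElem _ _ hr
    by_cases hin : xo ≤ X ∧ X < xo + w
    · -- the translated original cells
      obtain ⟨hi1, hi2⟩ := hin
      have hXget : (pvRowB (grove[Y - yo]'hr) w xo)[X]'hX2
          = (if (grove[Y - yo]'hr).getD (X - xo) "" = "#" then "#" else ".") := by
        simp only [pvRowB]
        rw [List.getElem_append_left (by simp; omega),
          List.getElem_append_right (by simp; omega), List.getElem_map, List.getElem_range]
        congr 2
        simp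
      rw [hXget]
      by_cases hc : (grove[Y - yo]'hr).getD (X - xo) "" = "#"
      · rw [if_pos hc, if_pos]
        rw [hcell X]; exact ⟨hm1, hm2, hi1, hi2, by rw [hgetDrow]; exact hc⟩
      · rw [if_neg hc, if_neg]
        rw [hcell X]; rintro ⟨_, _, _, _, hc'⟩; rw [hgetDrow] at hc'; exact hc hc'
    · -- side padding: cell is "."
      have hXget : (pvRowB (grove[Y - yo]'hr) w xo)[X]'hX2 = "." := by
        simp only [pvRowB]
        by_cases hl : X < xo
        · rw [List.getElem_append_left (by simp; omega),
            List.getElem_append_left (by simpa using hl), List.getElem_replicate]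
        · rw [List.getElem_append_right (by simp; omega), List.getElem_replicate]
      rw [hXget, if_neg]
      rw [hcell X]; rintro ⟨_, _, h3, h4, _⟩; exact hin ⟨h3, h4⟩
  · -- top/bottom padding: whole row blank
    have hYget : (List.replicate yo (pvBlank w xo) ++ grove.map (fun row => pvRowB row w xo) ++
        List.replicate yo (pvBlank w xo))[Y]'hY2 = pvBlank w xo := by
      by_cases ht : Y < yo
      · rw [List.getElem_append_left (by simp; omega),
          List.getElem_append_left (by simpa using ht), List.getElem_replicate]
      · have hge : yo + h ≤ Y := by
          rcases Nat.lt_or_ge Y (yo + h) with h1 | h1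
          · exact absurd ⟨by omega, h1⟩ hmid
          · exact h1
        rw [List.getElem_append_right (by simp; omega), List.getElem_replicate]
    rw [hYget]
    apply List.ext_getElem
    · simp [pv_blank_eq]; omega
    intro X hX1 hX2
    rw [List.getElem_map, List.getElem_range, List.getElem_of_eq (pv_blank_eq w xo),
      List.getElem_replicate, if_neg]
    rw [hcell X]; rintro ⟨h1, h2, _⟩; exact hmid ⟨h1, h2⟩

-- ===== VERDICT (by name: the statement is the Claim_ definition above) =====
theorem double_grove_spec : Claim_equal_double_grove := by
  intro grove _ _
  show double_grove grove = double_grove_alt grove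
  rw [pv_A_eq_padded, pv_B_eq_padded]
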